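-- pv_equiv track=rewrite | github.com/YelenaTor/FoM-Datamined-Insanity | tools/discover_resources.py | categorize_scripts
-- ===== SOURCE A (Python) =====
-- TOOL_PATTERNS = {
--     "hoe":    ["hoe_node", "can_hoe_node"],
--     "pick":   ["pick_node", "can_pick_node", "pick_axe"],
--     "water":  ["water_node", "can_water_node", "water_all", "water_chunk"],
--     "chop":   ["chop_node", "can_chop_node"],
--     "shovel": ["shovel_node", "can_shovel_node"],
--     "slash":  ["slash_node"],
--     "plant":  ["plant_seed", "plant_grass", "plant_sapling", "can_plant"],
--     "spawn":  ["spawn_resource", "spawn_node", "register_node", "item_node",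
--                "create_node_prototypes", "find_node"],
--     "respawn": ["bush_node_new_day", "crop_node_new_day", "tree_node_new_day", "new_day"],
-- }
--
-- def categorize_scripts(all_scripts):
--     categorized = {cat: [] for cat in TOOL_PATTERNS}
--     categorized["other_node"] = []
--     seen = set()
--     for cat, patterns in TOOL_PATTERNS.items():
--         for s in all_scripts:
--             if any(p in s.lower() for p in patterns) and s not in seen:
--                 categorized[cat].append(s)
--                 seen.add(s)
--     for s in all_scripts:
--         if "node" in s.lower() and s not in seen:
--             categorized["other_node"].append(s)
--     return categorized
-- ===== SOURCE B (Python) =====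
-- TOOL_PATTERNS = {
--     "hoe":    ["hoe_node", "can_hoe_node"],
--     "pick":   ["pick_node", "can_pick_node", "pick_axe"],
--     "water":  ["water_node", "can_water_node", "water_all", "water_chunk"],
--     "chop":   ["chop_node", "can_chop_node"],
--     "shovel": ["shovel_node", "can_shovel_node"],
--     "slash":  ["slash_node"],
--     "plant":  ["plant_seed", "plant_grass", "plant_sapling", "can_plant"],
--     "spawn":  ["spawn_resource", "spawn_node", "register_node", "item_node",
--                "create_node_prototypes", "find_node"],
--     "respawn": ["bush_node_new_day", "crop_node_new_day", "tree_node_new_day", "new_day"],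
-- }
--
-- def _classify(s):
--     sl = s.lower()
--     for cat, patterns in TOOL_PATTERNS.items():
--         if any(p in sl for p in patterns):
--             return cat
--     return None
--
-- def categorize_scripts(all_scripts):
--     # classify each (first-occurrence-deduplicated) script once, then build each
--     # category's list by filtering on the label; no mutable dict/seen-set bookkeeping
--     firsts = list(dict.fromkeys(all_scripts))
--     result = {cat: [s for s in firsts if _classify(s) == cat] for cat in TOOL_PATTERNS}
--     result["other_node"] = [s for s in all_scripts
--                             if _classify(s) is None and "node" in s.lower()]
--     return result
-- ===== Notes on version B (the rewrite author's own statement) =====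
-- stated objective: alternative
-- what changed: Replaces A's mutable dict + seen-set bookkeeping (one scan of all_scripts per category plus a fallback scan) by a pure staged pipeline: dedupe the scripts once (first occurrences), classify each script with a single first-matching-category function, and build each category's list by filtering on that label; other_node is a filter of the raw list on 'unclassified and contains node'.
import Mathlib
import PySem

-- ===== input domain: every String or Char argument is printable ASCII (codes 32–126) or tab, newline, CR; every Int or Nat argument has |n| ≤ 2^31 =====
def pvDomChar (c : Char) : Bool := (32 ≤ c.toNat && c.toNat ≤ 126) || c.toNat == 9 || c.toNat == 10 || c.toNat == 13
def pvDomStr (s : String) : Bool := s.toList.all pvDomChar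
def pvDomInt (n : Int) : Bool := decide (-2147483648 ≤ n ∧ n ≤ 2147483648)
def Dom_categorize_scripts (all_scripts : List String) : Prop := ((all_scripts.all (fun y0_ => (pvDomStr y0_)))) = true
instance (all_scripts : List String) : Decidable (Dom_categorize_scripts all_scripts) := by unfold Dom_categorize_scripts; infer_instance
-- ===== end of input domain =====

-- B replaces A's mutable dict + seen-set bookkeeping by a pure staged pipeline:
-- dedupe once, classify each script by its first matching category, build each
-- category list as a filter on that label; same return value (objective: alternative).

-- ===== PORT A =====
def TOOL_PATTERNS : List (String × List String) := [
  ("hoe",    ["hoe_node", "can_hoe_node"]),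
  ("pick",   ["pick_node", "can_pick_node", "pick_axe"]),
  ("water",  ["water_node", "can_water_node", "water_all", "water_chunk"]),
  ("chop",   ["chop_node", "can_chop_node"]),
  ("shovel", ["shovel_node", "can_shovel_node"]),
  ("slash",  ["slash_node"]),
  ("plant",  ["plant_seed", "plant_grass", "plant_sapling", "can_plant"]),
  ("spawn",  ["spawn_resource", "spawn_node", "register_node", "item_node",
              "create_node_prototypes", "find_node"]),
  ("respawn", ["bush_node_new_day", "crop_node_new_day", "tree_node_new_day", "new_day"])]

def categorize_scripts (all_scripts : List String) : List (String × List String) :=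
  let categorized : PySem.Dict String (List String) :=
    TOOL_PATTERNS.foldl (fun d cp => d.insert cp.1 []) PySem.Dict.empty
  let categorized := categorized.insert "other_node" []
  let st :=
    TOOL_PATTERNS.foldl (fun (st : PySem.Dict String (List String) × PySem.Set String) cp =>
      all_scripts.foldl (fun st s =>
        if (cp.2.any (fun p => PySem.Str.isIn p (PySem.Str.lower s)))
            && !(PySem.Set.contains st.2 s) then
          (st.1.modify cp.1 [] (· ++ [s]), PySem.Set.add st.2 s)
        else st) st)
      (categorized, PySem.Set.empty)
  let categorized :=
    all_scripts.foldl (fun d s =>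
      if PySem.Str.isIn "node" (PySem.Str.lower s) && !(PySem.Set.contains st.2 s) then
        d.modify "other_node" [] (· ++ [s])
      else d) st.1
  categorized.items

-- ===== PORT B =====
-- Source B's helper _classify: first category whose patterns match the lowercased script
def pvClassify (s : String) : Option String :=
  let sl := PySem.Str.lower s
  (TOOL_PATTERNS.find? (fun cp => cp.2.any (fun p => PySem.Str.isIn p sl))).map (·.1)

def categorize_scripts_alt (all_scripts : List String) : List (String × List String) :=
  let firsts := PySem.List.dedup all_scripts   -- list(dict.fromkeys(all_scripts))
  TOOL_PATTERNS.map (fun cp =>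
    (cp.1, firsts.filter (fun s => pvClassify s == some cp.1)))
  ++ [("other_node", all_scripts.filter (fun s =>
        (pvClassify s).isNone && PySem.Str.isIn "node" (PySem.Str.lower s)))]

-- ===== PRECONDITION & SPEC =====
def Spec_categorize_scripts (all_scripts : List String) (out : List (String × List String)) : Prop := out = categorize_scripts_alt all_scripts
instance (all_scripts : List String) (out : List (String × List String)) : Decidable (Spec_categorize_scripts all_scripts out) := by unfold Spec_categorize_scripts; infer_instance

-- ===== CLAIM (what is proved, stated in full; the proofs are below) =====
def Claim_equal_categorize_scripts : Prop := ∀ (all_scripts : List String), Dom_categorize_scripts all_scripts → Spec_categorize_scripts all_scripts (categorize_scripts all_scripts)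

-- ===== LEMMAS AND PROOFS =====

-- first category pair of pl whose patterns match (lowercased) s
def fcIn (pl : List (String × List String)) (s : String) : Option (String × List String) :=
  pl.find? (fun cp => cp.2.any (fun p => PySem.Str.isIn p (PySem.Str.lower s)))

-- first occurrences of a list that are not in seen
def fo (seen : List String) : List String → List String
  | [] => []
  | s :: l => if s ∈ seen then fo seen l else s :: fo (s :: seen) l

theorem mem_fo (x : String) : ∀ (xs seen : List String), x ∈ fo seen xs ↔ x ∈ xs ∧ x ∉ seen := by
  intro xs
  induction xs with
  | nil => intro seen; simp [fo]
  | cons s l ih =>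
    intro seen
    by_cases hs : s ∈ seen
    · simp only [fo, if_pos hs, ih, List.mem_cons]
      constructor
      · rintro ⟨h1, h2⟩; exact ⟨Or.inr h1, h2⟩
      · rintro ⟨h1 | h1, h2⟩
        · exact absurd (h1 ▸ hs) h2
        · exact ⟨h1, h2⟩
    · simp only [fo, if_neg hs, List.mem_cons, ih]
      constructor
      · rintro (rfl | ⟨h1, h2⟩)
        · exact ⟨Or.inl rfl, hs⟩
        · exact ⟨Or.inr h1, fun h => h2 (Or.inr h)⟩
      · rintro ⟨rfl | h1, h2⟩
        · exact Or.inl rfl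
        · by_cases hxs : x = s
          · exact Or.inl hxs
          · exact Or.inr ⟨h1, by simp [hxs, h2]⟩
theorem fo_congr : ∀ (xs seen₁ seen₂ : List String), (∀ x ∈ xs, x ∈ seen₁ ↔ x ∈ seen₂) →
    fo seen₁ xs = fo seen₂ xs := by
  intro xs
  induction xs with
  | nil => intros; rfl
  | cons s l ih =>
    intro s1 s2 h
    have hs := h s (List.mem_cons_self ..)
    by_cases hm : s ∈ s1
    · rw [fo, fo, if_pos hm, if_pos (hs.mp hm), ih _ _ (fun x hx => h x (List.mem_cons_of_mem _ hx))]
    · rw [fo, fo, if_neg hm, if_neg (fun h2 => hm (hs.mpr h2))]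
      congr 1
      exact ih _ _ (fun x hx => by simp only [List.mem_cons]; rw [h x (List.mem_cons_of_mem _ hx)])
theorem fo_filter (p : String → Bool) : ∀ (ys seen₁ seen₂ : List String),
    (∀ x ∈ ys, p x = true → (x ∈ seen₁ ↔ x ∈ seen₂)) → (∀ x ∈ ys, p x = false → x ∈ seen₁) →
    fo seen₁ ys = fo seen₂ (ys.filter p) := by
  intro ys
  induction ys with
  | nil => intros; rfl
  | cons s l ih =>
    intro s1 s2 h1 h2
    by_cases hp : p s = true
    · rw [List.filter_cons_of_pos hp]
      by_cases hm : s ∈ s1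
      · rw [fo, if_pos hm, fo, if_pos (((h1 s (List.mem_cons_self ..) hp)).mp hm)]
        exact ih _ _ (fun x hx hpx => h1 x (List.mem_cons_of_mem _ hx) hpx)
          (fun x hx hpx => h2 x (List.mem_cons_of_mem _ hx) hpx)
      · rw [fo, if_neg hm, fo,
          if_neg (fun hm2 => hm (((h1 s (List.mem_cons_self ..) hp)).mpr hm2))]
        congr 1
        exact ih _ _
          (fun x hx hpx => by
            simp only [List.mem_cons]
            rw [h1 x (List.mem_cons_of_mem _ hx) hpx])
          (fun x hx hpx => List.mem_cons_of_mem _ (h2 x (List.mem_cons_of_mem _ hx) hpx))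
    · rw [List.filter_cons_of_neg hp, fo,
        if_pos (h2 s (List.mem_cons_self ..) (Bool.eq_false_iff.mpr hp))]
      exact ih _ _ (fun x hx hpx => h1 x (List.mem_cons_of_mem _ hx) hpx)
        (fun x hx hpx => h2 x (List.mem_cons_of_mem _ hx) hpx)

-- fo with empty seen commutes with filtering by a pure predicate
theorem fo_filter_comm (p : String → Bool) : ∀ (l seen : List String),
    fo seen (l.filter p) = (fo seen l).filter p := by
  intro l
  induction l with
  | nil => intros; rfl
  | cons s l ih =>
    intro seen
    rw [List.filter_cons]
    by_cases hp : p s = true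
    · rw [if_pos hp]
      by_cases hm : s ∈ seen
      · rw [fo, if_pos hm, fo, if_pos hm, ih]
      · rw [fo, if_neg hm, fo, if_neg hm, List.filter_cons, if_pos hp, ih]
    · have hp' : p s = false := Bool.eq_false_iff.mpr hp
      rw [if_neg hp]
      by_cases hm : s ∈ seen
      · rw [fo, if_pos hm, ih]
      · rw [fo, if_neg hm, List.filter_cons,
          if_neg (by rw [hp']; exact Bool.false_ne_true), ← ih]
        apply fo_congr
        intro x hx
        have hxs : x ≠ s := fun h => by
          have := List.of_mem_filter hx
          rw [h] at this
          rw [hp'] at this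
          exact Bool.false_ne_true this
        simp [hxs]

-- Python set()/dict.fromkeys dedup is fo with an accumulator
theorem foldl_add_eq_fo : ∀ (l : List String) (acc : List String),
    l.foldl PySem.Set.add acc = acc ++ fo acc l := by
  intro l
  induction l with
  | nil => intro acc; simp [fo]
  | cons s l ih =>
    intro acc
    rw [List.foldl_cons]
    by_cases hm : s ∈ acc
    · rw [PySem.Set.add_of_mem hm, ih, fo, if_pos hm]
    · rw [PySem.Set.add_of_not_mem hm, ih, fo, if_neg hm]
      rw [List.append_assoc, List.singleton_append]
      congr 2
      exact fo_congr _ _ _ (fun x hx => by simp [List.mem_append, or_comm])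

theorem dedup_eq_fo (l : List String) : PySem.List.dedup l = fo [] l := by
  rw [PySem.List.dedup_eq_ofList, PySem.Set.ofList_eq_foldl, foldl_add_eq_fo]
  rfl

theorem dict_insert_getD_self (d : PySem.Dict String (List String)) (k : String) (v : List String)
    (hc : d.contains k = true) (hnd : d.keys.Nodup) : d.insert k (d.getD k v) = d := by
  apply PySem.Dict.ext
  rw [PySem.Dict.items_insert_of_contains d _ hc]
  conv_rhs => rw [← List.map_id d.items]
  apply List.map_congr_left
  intro p hp
  by_cases hk : p.1 = k
  · have : (p.1, p.2) ∈ d.items := hp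
    rw [hk] at this
    have hv := PySem.Dict.getD_of_mem_items d this hnd v
    simp only [hk, beq_self_eq_true, if_pos, id]
    rw [hv, ← hk]
  · simp [hk, id]
theorem dict_modify_modify_self (d : PySem.Dict String (List String)) (k : String)
    (f g : List String → List String) :
    (d.modify k [] f).modify k [] g = d.modify k [] (fun v => g (f v)) := by
  simp [PySem.Dict.modify, PySem.Dict.insert_insert_self, PySem.Dict.getD_insert_self]
theorem dict_modify_id (d : PySem.Dict String (List String)) (k : String)
    (hc : d.contains k = true) (hnd : d.keys.Nodup) : d.modify k [] (fun v => v) = d := by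
  rw [PySem.Dict.modify]
  exact dict_insert_getD_self d k [] hc hnd
theorem dict_keys_modify_of_contains (d : PySem.Dict String (List String)) (k : String)
    (f : List String → List String) (hc : d.contains k = true) : (d.modify k [] f).keys = d.keys := by
  rw [PySem.Dict.modify, PySem.Dict.keys_insert_of_contains d _ hc]
-- A's inner loop over all_scripts for one category (c, ps)
theorem innerA (c : String) (ps : List String) :
    ∀ (l : List String) (d : PySem.Dict String (List String)) (seen : List String),
    d.contains c = true → d.keys.Nodup →
    l.foldl (fun (st : PySem.Dict String (List String) × PySem.Set String) s =>
        if (ps.any (fun p => PySem.Str.isIn p (PySem.Str.lower s)))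
            && !(PySem.Set.contains st.2 s) then
          (st.1.modify c [] (· ++ [s]), PySem.Set.add st.2 s)
        else st) (d, seen)
      = (d.modify c [] (· ++ fo seen (l.filter (fun s => ps.any (fun p => PySem.Str.isIn p (PySem.Str.lower s))))),
         seen ++ fo seen (l.filter (fun s => ps.any (fun p => PySem.Str.isIn p (PySem.Str.lower s))))) := by
  intro l
  induction l with
  | nil =>
    intro d seen hc hnd
    simp only [List.foldl_nil, List.filter_nil, fo, List.append_nil]
    rw [dict_modify_id d c hc hnd]
  | cons s l ih =>
    intro d seen hc hnd
    rw [List.foldl_cons, List.filter_cons]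
    by_cases hm : (ps.any (fun p => PySem.Str.isIn p (PySem.Str.lower s))) = true
    · rw [if_pos hm]
      by_cases hs : s ∈ seen
      · have hcon : PySem.Set.contains seen s = true := (PySem.Set.contains_iff _ _).mpr hs
        simp only [hcon, Bool.not_true, Bool.and_false]
        rw [fo, if_pos hs]
        exact ih d seen hc hnd
      · have hcon : PySem.Set.contains seen s = false := by
          rw [← Bool.not_eq_true]
          exact fun h => hs ((PySem.Set.contains_iff _ _).mp h)
        simp only [hm, hcon, Bool.not_false, Bool.and_true, if_true]
        rw [PySem.Set.add_of_not_mem hs]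
        have hc2 : (d.modify c [] (· ++ [s])).contains c = true := by
          rw [PySem.Dict.contains_modify]; simp
        have hnd2 : (d.modify c [] (· ++ [s])).keys.Nodup := by
          rw [dict_keys_modify_of_contains d c _ hc]; exact hnd
        rw [ih _ _ hc2 hnd2]
        rw [dict_modify_modify_self]
        rw [fo, if_neg hs]
        simp only [Prod.mk.injEq]
        have hfo : fo (seen ++ [s]) (List.filter (fun s => ps.any fun p => PySem.Str.isIn p (PySem.Str.lower s)) l)
            = fo (s :: seen) (List.filter (fun s => ps.any fun p => PySem.Str.isIn p (PySem.Str.lower s)) l) :=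
          fo_congr _ _ _ (fun x hx => by simp [List.mem_append, or_comm])
        constructor
        · congr 1
          funext v
          rw [List.append_assoc, List.singleton_append, hfo]
        · rw [List.append_assoc, List.singleton_append, hfo]
    · have hm2 : (ps.any (fun p => PySem.Str.isIn p (PySem.Str.lower s))) = false := by
        rw [← Bool.not_eq_true]; exact hm
      rw [if_neg hm]
      simp only [hm2, Bool.false_and]
      exact ih d seen hc hnd
-- A's outer loop over the categories
theorem fcIn_cons_head (cp₀ : String × List String) (pl : List (String × List String)) (s : String) :
    (fcIn (cp₀ :: pl) s == some cp₀) = cp₀.2.any (fun p => PySem.Str.isIn p (PySem.Str.lower s)) := by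
  by_cases hm : cp₀.2.any (fun p => PySem.Str.isIn p (PySem.Str.lower s)) = true
  · rw [hm, fcIn, List.find?_cons_of_pos (p := fun (cp : String × List String) => cp.2.any fun p => PySem.Str.isIn p (PySem.Str.lower s)) hm]; simp
  · rw [fcIn, List.find?_cons_of_neg (p := fun (cp : String × List String) => cp.2.any fun p => PySem.Str.isIn p (PySem.Str.lower s)) hm]
    rw [Bool.eq_false_iff.mpr hm]
    by_cases h2 : List.find? (fun cp => cp.2.any (fun p => PySem.Str.isIn p (PySem.Str.lower s))) pl = some cp₀
    · exact absurd (List.find?_some h2) hm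
    · cases hf : List.find? (fun cp => cp.2.any (fun p => PySem.Str.isIn p (PySem.Str.lower s))) pl with
      | none => rfl
      | some cp =>
          have hne : cp ≠ cp₀ := fun h => h2 (hf ▸ h ▸ rfl)
          simp [hne]

theorem fcIn_cons_tail (cp₀ cp : String × List String) (pl : List (String × List String)) (s : String)
    (hne : cp ≠ cp₀) :
    (fcIn (cp₀ :: pl) s == some cp)
      = (!(cp₀.2.any (fun p => PySem.Str.isIn p (PySem.Str.lower s))) && (fcIn pl s == some cp)) := by
  by_cases hm : cp₀.2.any (fun p => PySem.Str.isIn p (PySem.Str.lower s)) = true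
  · rw [hm, fcIn, List.find?_cons_of_pos (p := fun (cp : String × List String) => cp.2.any fun p => PySem.Str.isIn p (PySem.Str.lower s)) hm]
    simp [Ne.symm hne]
  · rw [Bool.eq_false_iff.mpr hm, fcIn, List.find?_cons_of_neg (p := fun (cp : String × List String) => cp.2.any fun p => PySem.Str.isIn p (PySem.Str.lower s)) hm, Bool.not_false, Bool.true_and, fcIn]

theorem isSome_fcIn_cons (cp₀ : String × List String) (pl : List (String × List String)) (s : String) :
    (fcIn (cp₀ :: pl) s).isSome
      = ((cp₀.2.any (fun p => PySem.Str.isIn p (PySem.Str.lower s))) || (fcIn pl s).isSome) := by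
  by_cases hm : cp₀.2.any (fun p => PySem.Str.isIn p (PySem.Str.lower s)) = true
  · rw [hm, fcIn, List.find?_cons_of_pos (p := fun (cp : String × List String) => cp.2.any fun p => PySem.Str.isIn p (PySem.Str.lower s)) hm]; rfl
  · rw [Bool.eq_false_iff.mpr hm, fcIn, List.find?_cons_of_neg (p := fun (cp : String × List String) => cp.2.any fun p => PySem.Str.isIn p (PySem.Str.lower s)) hm, Bool.false_or, fcIn]

theorem outerA (l : List String) :
    ∀ (pl : List (String × List String)) (d : PySem.Dict String (List String)) (seen : List String),
    (pl.map (·.1)).Nodup → (∀ cp ∈ pl, d.contains cp.1 = true) → d.keys.Nodup →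
    ∃ seenF : List String,
    pl.foldl (fun (st : PySem.Dict String (List String) × PySem.Set String) cp =>
        l.foldl (fun st s =>
          if (cp.2.any (fun p => PySem.Str.isIn p (PySem.Str.lower s)))
              && !(PySem.Set.contains st.2 s) then
            (st.1.modify cp.1 [] (· ++ [s]), PySem.Set.add st.2 s)
          else st) st) (d, seen)
      = (pl.foldl (fun d cp => d.modify cp.1 [] (· ++ fo seen (l.filter (fun s => fcIn pl s == some cp)))) d, seenF)
    ∧ (∀ x, x ∈ seenF ↔ x ∈ seen ∨ (x ∈ l ∧ (fcIn pl x).isSome)) := by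
  intro pl
  induction pl with
  | nil =>
    intro d seen _ _ _
    refine ⟨seen, rfl, fun x => ?_⟩
    simp [fcIn]
  | cons cp₀ pl ih =>
    intro d seen hnd hc hknd
    have hnd' := hnd
    simp only [List.map_cons, List.nodup_cons] at hnd'
    rw [List.foldl_cons, List.foldl_cons,
      innerA cp₀.1 cp₀.2 l d seen (hc cp₀ (List.mem_cons_self ..)) hknd]
    set m₀ : String → Bool := fun s => cp₀.2.any (fun p => PySem.Str.isIn p (PySem.Str.lower s)) with hm₀
    set A₀ := fo seen (l.filter m₀) with hA₀
    have hc1 : ∀ cp ∈ pl, (d.modify cp₀.1 [] (· ++ A₀)).contains cp.1 = true := by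
      intro cp h
      rw [PySem.Dict.contains_modify]
      simp [hc cp (List.mem_cons_of_mem _ h)]
    have hknd1 : (d.modify cp₀.1 [] (· ++ A₀)).keys.Nodup := by
      rw [dict_keys_modify_of_contains _ _ _ (hc cp₀ (List.mem_cons_self ..))]; exact hknd
    obtain ⟨seenF, heq, hmemF⟩ := ih (d.modify cp₀.1 [] (· ++ A₀)) (seen ++ A₀) hnd'.2 hc1 hknd1
    refine ⟨seenF, ?_, ?_⟩
    · rw [heq]
      have hhead : fo seen (l.filter (fun s => fcIn (cp₀ :: pl) s == some cp₀)) = A₀ := by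
        rw [hA₀]
        congr 1
        exact List.filter_congr (fun x _ => fcIn_cons_head cp₀ pl x)
      have hfold : pl.foldl (fun d cp => d.modify cp.1 []
            (· ++ fo (seen ++ A₀) (l.filter (fun s => fcIn pl s == some cp)))) (d.modify cp₀.1 [] (· ++ A₀))
          = pl.foldl (fun d cp => d.modify cp.1 []
            (· ++ fo seen (l.filter (fun s => fcIn (cp₀ :: pl) s == some cp)))) (d.modify cp₀.1 [] (· ++ A₀)) := by
        apply PySem.List.foldl_congr_mem
        intro acc cp hcp
        have hne : cp ≠ cp₀ := fun h => hnd'.1 (by rw [← h]; exact List.mem_map_of_mem hcp)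
        have hfilters : l.filter (fun s => fcIn (cp₀ :: pl) s == some cp)
            = (l.filter (fun s => fcIn pl s == some cp)).filter (fun x => !(m₀ x)) := by
          rw [List.filter_filter]
          exact List.filter_congr (fun x _ => by rw [fcIn_cons_tail cp₀ cp pl x hne])
        rw [hfilters,
          ← fo_filter (fun x => !(m₀ x)) (l.filter (fun s => fcIn pl s == some cp)) (seen ++ A₀) seen
            (fun x hx hpx => by
              simp only [List.mem_append]
              constructor
              · rintro (h | h)
                · exact h
                · exfalso
                  have := ((mem_fo x _ _).mp (hA₀ ▸ h)).1
                  have := List.of_mem_filter this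
                  simp only [Bool.not_eq_true'] at hpx
                  rw [hpx] at this
                  exact Bool.false_ne_true this
              · exact Or.inl)
            (fun x hx hpx => by
              have hpx2 : m₀ x = true := by simpa using hpx
              by_cases hxs : x ∈ seen
              · exact List.mem_append.mpr (Or.inl hxs)
              · refine List.mem_append.mpr (Or.inr ?_)
                rw [hA₀]
                exact (mem_fo x _ _).mpr ⟨List.mem_filter.mpr ⟨List.mem_of_mem_filter hx, hpx2⟩, hxs⟩)]
      rw [hfold, hhead]
    · intro x
      rw [hmemF x]
      simp only [List.mem_append, isSome_fcIn_cons]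
      constructor
      · rintro ((h | h) | ⟨h1, h2⟩)
        · exact Or.inl h
        · have h' := (mem_fo x _ _).mp (hA₀ ▸ h)
          refine Or.inr ⟨List.mem_of_mem_filter h'.1, by
            rw [Bool.or_eq_true]
            refine Or.inl ?_
            have hfact := List.of_mem_filter h'.1
            simp only [hm₀] at hfact
            exact hfact⟩
        · exact Or.inr ⟨h1, by rw [Bool.or_eq_true]; exact Or.inr h2⟩
      · rintro (h | ⟨h1, h2⟩)
        · exact Or.inl (Or.inl h)
        · simp only [Bool.or_eq_true] at h2
          rcases h2 with h2 | h2
          · by_cases hxs : x ∈ seen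
            · exact Or.inl (Or.inl hxs)
            · exact Or.inl (Or.inr (hA₀ ▸ (mem_fo x _ _).mpr ⟨List.mem_filter.mpr ⟨h1, h2⟩, hxs⟩))
          · exact Or.inr ⟨h1, h2⟩
-- getD / keys of a fold of per-category appends (pairwise distinct keys)
theorem getD_foldl_modifyList_not_mem (f : (String × List String) → List String) :
    ∀ (pl : List (String × List String)) (d : PySem.Dict String (List String)) (k : String),
    k ∉ pl.map (·.1) →
    (pl.foldl (fun d cp => d.modify cp.1 [] (· ++ f cp)) d).getD k [] = d.getD k [] := by
  intro pl
  induction pl with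
  | nil => intros; rfl
  | cons cp pl ih =>
    intro d k hk
    simp only [List.map_cons, List.mem_cons, not_or] at hk
    rw [List.foldl_cons, ih _ _ hk.2, PySem.Dict.getD_modify, if_neg hk.1]
theorem getD_foldl_modifyList (f : (String × List String) → List String) :
    ∀ (pl : List (String × List String)) (d : PySem.Dict String (List String)),
    (pl.map (·.1)).Nodup →
    ∀ cp ∈ pl, (pl.foldl (fun d cp => d.modify cp.1 [] (· ++ f cp)) d).getD cp.1 []
      = d.getD cp.1 [] ++ f cp := by
  intro pl
  induction pl with
  | nil => intro d _ cp h; exact absurd h (List.not_mem_nil)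
  | cons cp0 pl ih =>
    intro d hnd cp hcp
    have hnd' := hnd
    simp only [List.map_cons, List.nodup_cons] at hnd'
    rw [List.foldl_cons]
    rcases List.mem_cons.mp hcp with rfl | hmem
    · rw [getD_foldl_modifyList_not_mem f pl _ _ hnd'.1,
        PySem.Dict.getD_modify, if_pos rfl]
    · rw [ih _ hnd'.2 cp hmem, PySem.Dict.getD_modify,
        if_neg (fun h => hnd'.1 (by rw [← h]; exact List.mem_map_of_mem hmem))]
theorem keys_foldl_modifyList (f : (String × List String) → List String) :
    ∀ (pl : List (String × List String)) (d : PySem.Dict String (List String)),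
    (∀ cp ∈ pl, d.contains cp.1 = true) →
    (pl.foldl (fun d cp => d.modify cp.1 [] (· ++ f cp)) d).keys = d.keys := by
  intro pl
  induction pl with
  | nil => intros; rfl
  | cons cp0 pl ih =>
    intro d hc
    rw [List.foldl_cons, ih _ (fun cp h => by
        rw [PySem.Dict.contains_modify]
        simp [hc cp (List.mem_cons_of_mem _ h)]),
      dict_keys_modify_of_contains _ _ _ (hc cp0 (List.mem_cons_self ..))]
-- append-at-a-fixed-key fold (A's fallback loop, after foldl_filter)
theorem getD_foldl_modify_const (k : String) :
    ∀ (xs : List String) (d : PySem.Dict String (List String)),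
    (xs.foldl (fun d s => d.modify k [] (· ++ [s])) d).getD k [] = d.getD k [] ++ xs := by
  intro xs
  induction xs with
  | nil => intro d; simp
  | cons s xs ih =>
    intro d
    rw [List.foldl_cons, ih, PySem.Dict.getD_modify, if_pos rfl, List.append_assoc,
      List.singleton_append]
theorem keys_foldl_modify_const (k : String) :
    ∀ (xs : List String) (d : PySem.Dict String (List String)), d.contains k = true →
    (xs.foldl (fun d s => d.modify k [] (· ++ [s])) d).keys = d.keys := by
  intro xs
  induction xs with
  | nil => intros; rfl
  | cons s xs ih =>
    intro d hc
    rw [List.foldl_cons, ih _ (by rw [PySem.Dict.contains_modify]; simp [hc]),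
      dict_keys_modify_of_contains _ _ _ hc]
theorem getD_foldl_modify_const_ne (k k' : String) (hne : k' ≠ k) :
    ∀ (xs : List String) (d : PySem.Dict String (List String)),
    (xs.foldl (fun d s => d.modify k [] (· ++ [s])) d).getD k' [] = d.getD k' [] := by
  intro xs
  induction xs with
  | nil => intro d; rfl
  | cons s xs ih =>
    intro d
    rw [List.foldl_cons, ih, PySem.Dict.getD_modify, if_neg hne]

theorem tp_key_inj : ∀ cp ∈ TOOL_PATTERNS, ∀ cp' ∈ TOOL_PATTERNS, cp.1 = cp'.1 → cp = cp' := by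
  have hK : (TOOL_PATTERNS.map (·.1)).Nodup := by decide
  intro cp h cp' h' he
  exact List.inj_on_of_nodup_map hK h h' he

theorem tp_key_ne_other : ∀ cp ∈ TOOL_PATTERNS, cp.1 ≠ "other_node" := by decide

-- pvClassify is the key of fcIn TOOL_PATTERNS
theorem classify_eq_map_fcIn (s : String) :
    pvClassify s = (fcIn TOOL_PATTERNS s).map (·.1) := rfl

theorem classify_eq_key (cp : String × List String) (hcp : cp ∈ TOOL_PATTERNS) (s : String) :
    (pvClassify s == some cp.1) = (fcIn TOOL_PATTERNS s == some cp) := by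
  rw [classify_eq_map_fcIn]
  cases hf : fcIn TOOL_PATTERNS s with
  | none => rfl
  | some cp' =>
    have hmem' : cp' ∈ TOOL_PATTERNS := List.mem_of_find?_eq_some hf
    simp only [Option.map_some]
    by_cases hk : cp'.1 = cp.1
    · have : cp' = cp := tp_key_inj cp' hmem' cp hcp hk
      subst this
      simp
    · have hne : cp' ≠ cp := fun h => hk (by rw [h])
      simp [hk, hne]

theorem classify_isNone (s : String) : (pvClassify s).isNone = (fcIn TOOL_PATTERNS s).isNone := by
  rw [classify_eq_map_fcIn]
  cases fcIn TOOL_PATTERNS s <;> rfl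

-- ===== VERDICT (by name: the statement is the Claim_ definition above) =====
set_option maxHeartbeats 4000000 in
theorem categorize_scripts_spec : Claim_equal_categorize_scripts := by
  intro all hdom
  show categorize_scripts all = categorize_scripts_alt all
  simp only [categorize_scripts, categorize_scripts_alt]
  set d0 : PySem.Dict String (List String) :=
    (TOOL_PATTERNS.foldl (fun d cp => d.insert cp.1 []) PySem.Dict.empty).insert "other_node" []
    with hd0
  have hKnd : d0.keys.Nodup := by rw [hd0]; decide
  have hcTP : ∀ cp ∈ TOOL_PATTERNS, d0.contains cp.1 = true := by rw [hd0]; decide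
  have hcO : d0.contains "other_node" = true := by rw [hd0]; decide
  have hTPnd : (TOOL_PATTERNS.map (·.1)).Nodup := by decide
  have hgTP : ∀ cp ∈ TOOL_PATTERNS, d0.getD cp.1 [] = [] := by rw [hd0]; decide
  have hgO : d0.getD "other_node" [] = [] := by rw [hd0]; decide
  have hOnotin : "other_node" ∉ TOOL_PATTERNS.map (·.1) := by decide
  have hkeys : d0.keys = TOOL_PATTERNS.map (·.1) ++ ["other_node"] := by rw [hd0]; decide
  -- A side: reduce the two fold phases to per-key filters
  obtain ⟨seenF, heqA, hmemF⟩ := outerA all TOOL_PATTERNS d0 PySem.Set.empty hTPnd hcTP hKnd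
  rw [heqA]
  set DA := TOOL_PATTERNS.foldl (fun d cp => d.modify cp.1 []
    (· ++ fo PySem.Set.empty (all.filter (fun s => fcIn TOOL_PATTERNS s == some cp)))) d0 with hDA
  have hDAkeys : DA.keys = d0.keys := by
    rw [hDA]; exact keys_foldl_modifyList _ TOOL_PATTERNS d0 hcTP
  have hDAc : DA.contains "other_node" = true := by
    rw [PySem.Dict.contains_eq_decide_mem_keys, hDAkeys,
      ← PySem.Dict.contains_eq_decide_mem_keys]
    exact hcO
  rw [← List.foldl_filter
    (p := fun s => PySem.Str.isIn "node" (PySem.Str.lower s) && !(PySem.Set.contains seenF s))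
    (f := fun (d : PySem.Dict String (List String)) s => d.modify "other_node" [] (· ++ [s]))]
  set FA := all.filter (fun s => PySem.Str.isIn "node" (PySem.Str.lower s)
    && !(PySem.Set.contains seenF s)) with hFA
  have hAkeys : (FA.foldl (fun d s => d.modify "other_node" [] (· ++ [s])) DA).keys = d0.keys := by
    rw [keys_foldl_modify_const _ _ _ hDAc, hDAkeys]
  have hAnd : (FA.foldl (fun d s => d.modify "other_node" [] (· ++ [s])) DA).keys.Nodup := by
    rw [hAkeys]; exact hKnd
  rw [PySem.Dict.items_eq_map_keys _ hAnd [], hAkeys, hkeys, List.map_append, List.map_map]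
  refine congrArg₂ (· ++ ·) ?_ ?_
  -- the tool categories
  · apply List.map_congr_left
    intro cp hcp
    simp only [Function.comp]
    rw [getD_foldl_modify_const_ne _ _ (tp_key_ne_other cp hcp) FA DA, hDA,
      getD_foldl_modifyList _ TOOL_PATTERNS d0 hTPnd cp hcp, hgTP cp hcp]
    refine congrArg (Prod.mk cp.1) ?_
    have hempty : (PySem.Set.empty : PySem.Set String) = ([] : List String) := rfl
    rw [List.nil_append, hempty, fo_filter_comm, ← dedup_eq_fo]
    exact List.filter_congr (fun x _ => (classify_eq_key cp hcp x).symm)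
  -- other_node
  · simp only [List.map_cons, List.map_nil]
    rw [getD_foldl_modify_const _ FA DA, hDA,
      getD_foldl_modifyList_not_mem _ TOOL_PATTERNS d0 _ hOnotin, hgO, hFA]
    simp only [List.nil_append]
    refine congrArg (fun l => [(("other_node" : String), l)]) ?_
    apply List.filter_congr
    intro x hx
    have hsF : PySem.Set.contains seenF x = (fcIn TOOL_PATTERNS x).isSome := by
      by_cases hm : x ∈ seenF
      · rw [(PySem.Set.contains_iff _ _).mpr hm]
        rcases (hmemF x).mp hm with h | ⟨_, h⟩
        · exact absurd h (List.not_mem_nil)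
        · exact h.symm
      · rw [Bool.eq_false_iff.mpr (fun hc => hm ((PySem.Set.contains_iff _ _).mp hc))]
        cases hfx : (fcIn TOOL_PATTERNS x).isSome with
        | false => rfl
        | true => exact absurd ((hmemF x).mpr (Or.inr ⟨hx, hfx⟩)) hm
    rw [hsF, classify_isNone]
    have hnn : (fcIn TOOL_PATTERNS x).isNone = !(fcIn TOOL_PATTERNS x).isSome := by
      cases fcIn TOOL_PATTERNS x <;> rfl
    rw [hnn]
    cases (fcIn TOOL_PATTERNS x).isSome <;>
      cases PySem.Str.isIn "node" (PySem.Str.lower x) <;> rfl
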